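-- pv_equiv track=rewrite | github.com/samy-00007/zig-bigint-tests | main.py | div_free_naive
-- ===== SOURCE A (Python) =====
-- chars = "0123456789ABCDEF"
--
-- def div_free_naive(a, b, k):
--     def convert_naive(y, k, n):
--         string = ""
--         for i in range(1, k + 1):
--             t = b * y
--             string += chars[t // (2**n)]
--             y = t % (2**n)
--         return string
--     n = (2 * (b ** k)).bit_length()
--     y = ((a + 1) * (2**n)) // (b**k) - 1
--     return convert_naive(y, k, n)
-- ===== SOURCE B (Python) =====
-- chars = "0123456789ABCDEF"
--
-- def div_free_naive(a, b, k):
--     n = (2 * (b ** k)).bit_length()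
--     y = ((a + 1) * (2 ** n)) // (b ** k) - 1
--     # one big division gives the k-digit base-b value of the fixed-point fraction
--     N = (b ** k * y) // (2 ** n)
--     s = ""
--     j = k
--     while j > 0:
--         s = chars[N % b] + s
--         N //= b
--         j -= 1
--     return s
-- ===== Notes on version B (the rewrite author's own statement) =====
-- stated objective: alternative
-- what changed: A's MSD-first fixed-point multiply/mod loop is replaced by one big division N = (b**k * y) // 2**n followed by a while loop that peels least-significant digits with N % b, N //= b and prepends them to the string.
-- outside the precondition, e.g. on div_free_naive(-5, 2, 3): A returns 'E11', B returns '011'; on div_free_naive(1000, 10, 3): A returns 'A00', B returns '000'; on div_free_naive(7, 1, 3): A returns '700', B returns '000'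
import Mathlib
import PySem

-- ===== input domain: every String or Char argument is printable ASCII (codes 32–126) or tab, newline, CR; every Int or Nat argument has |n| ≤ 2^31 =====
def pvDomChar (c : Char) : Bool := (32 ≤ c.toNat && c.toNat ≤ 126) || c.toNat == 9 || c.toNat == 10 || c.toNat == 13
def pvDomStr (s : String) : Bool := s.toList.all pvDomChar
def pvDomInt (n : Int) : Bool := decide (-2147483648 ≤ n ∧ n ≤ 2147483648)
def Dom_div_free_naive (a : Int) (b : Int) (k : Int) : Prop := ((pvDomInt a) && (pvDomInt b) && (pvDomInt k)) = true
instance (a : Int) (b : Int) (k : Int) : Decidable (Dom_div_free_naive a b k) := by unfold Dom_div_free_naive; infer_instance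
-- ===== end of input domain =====

-- B replaces A's MSD-first fixed-point multiply/mod loop by ONE big division
-- N = (b^k*y)//2^n and a while loop that peels least-significant digits (N % b, N //= b)
-- and PREPENDS them (different decomposition, same exact output on Pre_).

-- ===== PORT A =====
-- the module constant chars = "0123456789ABCDEF", kept as a list of code points
def pvCharsList : List Char :=
  ['0','1','2','3','4','5','6','7','8','9','A','B','C','D','E','F']

-- the body of A's `for i in range(1, k+1)` loop (state: accumulated string, y);
-- `none` models the IndexError of `chars[t // 2**n]` (excluded by Pre_)
def pvStepA (b : Int) (M : Int) (st : Option (List Char) × Int) : Option (List Char) × Int :=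
  let t := b * st.2
  (match st.1, PySem.List.pyGet? pvCharsList (PySem.Int.floordiv t M) with
   | some s, some c => some (s ++ [c])
   | _, _ => none,
   PySem.Int.mod t M)

def div_free_naive (a : Int) (b : Int) (k : Int) : String :=
  -- Python's b ** k is an int only for k ≥ 0 (Pre_ requires 0 ≤ k; for k < 0 the Python
  -- raises AttributeError on float.bit_length), so the port writes b ^ k.toNat
  let n : Nat := PySem.Int.bitLength (2 * b ^ k.toNat)
  let y : Int := PySem.Int.floordiv ((a + 1) * 2 ^ n) (b ^ k.toNat) - 1
  let st := (PySem.List.pyRange 1 (k + 1) 1).foldl (fun st _ => pvStepA b (2 ^ n) st) (some [], y)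
  match st.1 with
  | some s => String.ofList s
  | none => ""   -- unreachable under Pre_ (an IndexError input)

-- ===== PORT B =====
-- B's `while j > 0` loop as tail recursion on the (nonnegative) counter j: each pass
-- prepends chars[N % b] to the accumulated string and replaces N by N // b;
-- `none` models the IndexError of `chars[N % b]` (excluded by Pre_)
def pvWhileB (b : Int) : Nat → Int → List Char → Option (List Char)
  | 0, _, s => some s
  | j + 1, N, s =>
    match PySem.List.pyGet? pvCharsList (PySem.Int.mod N b) with
    | some c => pvWhileB b j (PySem.Int.floordiv N b) (c :: s)
    | none => none

def div_free_naive_alt (a : Int) (b : Int) (k : Int) : String :=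
  let n : Nat := PySem.Int.bitLength (2 * b ^ k.toNat)
  let y : Int := PySem.Int.floordiv ((a + 1) * 2 ^ n) (b ^ k.toNat) - 1
  let N : Int := PySem.Int.floordiv (b ^ k.toNat * y) (2 ^ n)
  match pvWhileB b k.toNat N [] with
  | some s => String.ofList s
  | none => ""   -- unreachable under Pre_

-- ===== PRECONDITION & SPEC =====
-- Pre_ is the natural domain of the digit extractor: k ≥ 0 fractional digits of a/b^k in a base
-- the 16-char table covers (2..16), with 0 ≤ a < b^k; outside it A raises (k < 0, or an IndexError)
-- or returns a string produced by negative-index wraparound into the hex table / an overflow digit —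
-- accidental values of A's implementation that no caller would rely on.
def Pre_div_free_naive (a : Int) (b : Int) (k : Int) : Prop :=
  0 ≤ k ∧ (k = 0 ∨ (2 ≤ b ∧ b ≤ 16 ∧ 0 ≤ a ∧ a < b ^ k.toNat))
instance (a : Int) (b : Int) (k : Int) : Decidable (Pre_div_free_naive a b k) := by
  unfold Pre_div_free_naive; infer_instance

def pvWitness_div_free_naive : Int × Int × Int := (5, 10, 3)

def Spec_div_free_naive (a : Int) (b : Int) (k : Int) (out : String) : Prop :=
  out = div_free_naive_alt a b k
instance (a : Int) (b : Int) (k : Int) (out : String) : Decidable (Spec_div_free_naive a b k out) := by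
  unfold Spec_div_free_naive; infer_instance

-- ===== CLAIM (what is proved, stated in full; the proofs are below) =====
def Claim_equal_div_free_naive : Prop :=
  ∀ (a : Int) (b : Int) (k : Int), Dom_div_free_naive a b k → Pre_div_free_naive a b k →
    Spec_div_free_naive a b k (div_free_naive a b k)

-- ===== LEMMAS AND PROOFS =====

-- the digit a number d < 16 selects in the table
def pvDigitChar (d : Nat) : Char := pvCharsList.getD d '0'

-- pure digit recursions (Nat level)
def digA (B M : Nat) : Nat → Nat → List Nat
  | 0, _ => []
  | i + 1, y => (B * y / M) :: digA B M i (B * y % M)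

def digB (B : Nat) : Nat → Nat → List Nat
  | 0, _ => []
  | i + 1, N => (N % B) :: digB B i (N / B)

def msd (B : Nat) : Nat → Nat → List Nat
  | 0, _ => []
  | i + 1, N => (N / B ^ i) :: msd B i (N % B ^ i)

theorem foldl_const {α β : Type} (l : List β) (f : α → α) (init : α) :
    l.foldl (fun s _ => f s) init = f^[l.length] init := by
  induction l generalizing init with
  | nil => rfl
  | cons x xs ih => simp [List.foldl, ih, Function.iterate_succ_apply]

theorem pyGet?_chars (d : Nat) (hd : d < 16) :
    PySem.List.pyGet? pvCharsList (d : Int) = some (pvDigitChar d) := by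
  have hlen : d < pvCharsList.length := by simpa [pvCharsList] using hd
  simp [pvDigitChar, PySem.List.pyGet?_natCast, List.getD_eq_getElem?_getD,
    List.getElem?_eq_getElem hlen]

theorem digA_eq_msd (B M : Nat) (hB : 0 < B) (hM : 0 < M) :
    ∀ (i : Nat) (y : Nat), y < M → digA B M i y = msd B i (B ^ i * y / M) := by
  intro i
  induction i with
  | zero => intro y hy; rfl
  | succ i ih =>
    intro y hy
    have hBi : 0 < B ^ i := Nat.pow_pos hB
    have hy' : B * y % M < M := Nat.mod_lt _ hM
    have hkey : B ^ (i + 1) * y = B ^ i * (B * y % M) + M * (B ^ i * (B * y / M)) := by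
      have h0 : M * (B * y / M) + B * y % M = B * y := Nat.div_add_mod (B * y) M
      calc B ^ (i + 1) * y = B ^ i * (B * y) := by ring
        _ = B ^ i * (M * (B * y / M) + B * y % M) := by rw [h0]
        _ = B ^ i * (B * y % M) + M * (B ^ i * (B * y / M)) := by ring
    have hN' : B ^ i * (B * y % M) / M < B ^ i :=
      Nat.div_lt_of_lt_mul (by
        calc B ^ i * (B * y % M) < B ^ i * M := Nat.mul_lt_mul_of_pos_left hy' hBi
          _ = M * B ^ i := by ring)
    have hN : B ^ (i + 1) * y / M = B ^ i * (B * y % M) / M + B ^ i * (B * y / M) := by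
      rw [hkey, Nat.add_mul_div_left _ _ hM]
    show (B * y / M) :: digA B M i (B * y % M) =
      (B ^ (i + 1) * y / M) / B ^ i :: msd B i ((B ^ (i + 1) * y / M) % B ^ i)
    have hhead : (B ^ (i + 1) * y / M) / B ^ i = B * y / M := by
      rw [hN, Nat.add_mul_div_left _ _ hBi, Nat.div_eq_of_lt hN']
      simp
    have htail : (B ^ (i + 1) * y / M) % B ^ i = B ^ i * (B * y % M) / M := by
      rw [hN, Nat.add_mul_mod_self_left, Nat.mod_eq_of_lt hN']
    rw [hhead, htail, ih _ hy']

theorem msd_succ (B : Nat) (hB : 0 < B) :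
    ∀ (i : Nat) (N : Nat), N < B ^ (i + 1) →
      msd B (i + 1) N = msd B i (N / B) ++ [N % B] := by
  intro i
  induction i with
  | zero =>
    intro N hN
    have : N % B = N := Nat.mod_eq_of_lt (by simpa using hN)
    simp [msd, this]
  | succ i ih =>
    intro N hN
    have hmod : N % B ^ (i + 1) < B ^ (i + 1) := Nat.mod_lt _ (Nat.pow_pos hB)
    have h1 : N % B ^ (i + 1) % B = N % B :=
      Nat.mod_mod_of_dvd N (dvd_pow_self B (Nat.succ_ne_zero i))
    have h2 : N % B ^ (i + 1) / B = N / B % B ^ i := by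
      rw [← Nat.mod_mul_right_div_self, ← pow_succ']
    have h3 : N / B / B ^ i = N / B ^ (i + 1) := by
      rw [Nat.div_div_eq_div_mul, ← pow_succ']
    show (N / B ^ (i + 1)) :: msd B (i + 1) (N % B ^ (i + 1)) =
      ((N / B) / B ^ i :: msd B i (N / B % B ^ i)) ++ [N % B]
    rw [ih _ hmod, h1, h2, h3]
    simp

-- B's while loop prepends digits: after j passes the accumulator holds the msd digits of N
theorem whileB_msd (B : Nat) (hB : 0 < B) (hB16 : B ≤ 16) :
    ∀ (j : Nat) (N : Nat) (s : List Char), N < B ^ j →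
      pvWhileB (B : Int) j (N : Int) s = some ((msd B j N).map pvDigitChar ++ s) := by
  intro j
  induction j with
  | zero => intro N s hN; simp [pvWhileB, msd]
  | succ j ih =>
    intro N s hN
    have hr : N % B < 16 := lt_of_lt_of_le (Nat.mod_lt _ hB) hB16
    have hdiv : N / B < B ^ j := Nat.div_lt_of_lt_mul (by
      calc N < B ^ (j + 1) := hN
        _ = B * B ^ j := by rw [pow_succ'])
    show (match PySem.List.pyGet? pvCharsList (PySem.Int.mod (N : Int) (B : Int)) with
      | some c => pvWhileB (B : Int) j (PySem.Int.floordiv (N : Int) (B : Int)) (c :: s)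
      | none => none) = some ((msd B (j + 1) N).map pvDigitChar ++ s)
    rw [PySem.Int.mod_natCast, PySem.Int.floordiv_natCast, pyGet?_chars _ hr]
    show pvWhileB (B : Int) j (((N / B : Nat)) : Int) (pvDigitChar (N % B) :: s) =
      some ((msd B (j + 1) N).map pvDigitChar ++ s)
    rw [ih (N / B) (pvDigitChar (N % B) :: s) hdiv, msd_succ B hB j N hN]
    simp

theorem iterA (B M : Nat) (hB : 0 < B) (hB16 : B ≤ 16) (hM : 0 < M) :
    ∀ (i : Nat) (s : List Char) (y : Nat), y < M →
      ∃ y' : Nat, y' < M ∧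
        (pvStepA (B : Int) (M : Int))^[i] (some s, (y : Int)) =
          (some (s ++ (digA B M i y).map pvDigitChar), (y' : Int)) := by
  intro i
  induction i with
  | zero =>
    intro s y hy
    exact ⟨y, hy, by simp [digA]⟩
  | succ i ih =>
    intro s y hy
    have hd : B * y / M < B := Nat.div_lt_of_lt_mul (by
      calc B * y < B * M := Nat.mul_lt_mul_of_pos_left hy hB
        _ = M * B := by ring)
    have hd16 : B * y / M < 16 := lt_of_lt_of_le hd hB16
    have hy' : B * y % M < M := Nat.mod_lt _ hM
    have hstep : pvStepA (B : Int) (M : Int) (some s, (y : Int)) =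
        (some (s ++ [pvDigitChar (B * y / M)]), ((B * y % M : Nat) : Int)) := by
      have hmul : (B : Int) * (y : Int) = ((B * y : Nat) : Int) := by push_cast; ring
      simp only [pvStepA, hmul, PySem.Int.floordiv_natCast, PySem.Int.mod_natCast,
        pyGet?_chars _ hd16]
    obtain ⟨y'', hy'', hiter⟩ := ih (s ++ [pvDigitChar (B * y / M)]) (B * y % M) hy'
    refine ⟨y'', hy'', ?_⟩
    rw [Function.iterate_succ_apply, hstep, hiter]
    simp [digA]

-- ===== VERDICT (by name: the statement is the Claim_ definition above) =====
theorem div_free_naive_spec : Claim_equal_div_free_naive := by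
  intro a b k _ hpre
  obtain ⟨hk, hcase⟩ := hpre
  unfold Spec_div_free_naive
  rcases hcase with hk0 | ⟨hb2, hb16, ha0, halt⟩
  · subst hk0
    simp [div_free_naive, div_free_naive_alt, pvWhileB,
      PySem.List.pyRange_one_eq_nil (by norm_num : (1:Int) ≤ 1)]
  · obtain ⟨B', hB'⟩ : ∃ B' : Nat, b = (B' : Int) :=
      ⟨b.toNat, (Int.toNat_of_nonneg (by omega)).symm⟩
    obtain ⟨A', hA'⟩ : ∃ A' : Nat, a = (A' : Int) :=
      ⟨a.toNat, (Int.toNat_of_nonneg ha0).symm⟩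
    subst hB' hA'
    have hB2 : 2 ≤ B' := by exact_mod_cast hb2
    have hB16 : B' ≤ 16 := by exact_mod_cast hb16
    have hBpos : 0 < B' := by omega
    set K := k.toNat with hK
    have hAlt : A' < B' ^ K := by exact_mod_cast halt
    have hBKpos : 0 < B' ^ K := Nat.pow_pos hBpos
    -- the shared setup values
    have hpow : ((B' : Int)) ^ K = ((B' ^ K : Nat) : Int) := by push_cast; ring
    set n := PySem.Int.bitLength (2 * (B' : Int) ^ K) with hn
    set M := 2 ^ n with hMdef
    have hM : 0 < M := Nat.pow_pos (by norm_num)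
    have hMgt : B' ^ K < M := by
      have h1 := PySem.Int.lt_two_pow_bitLength (2 * (B' : Int) ^ K)
      have h2 : (2 * (B' : Int) ^ K) = ((2 * B' ^ K : Nat) : Int) := by push_cast; ring
      rw [h2, Int.natAbs_natCast, ← h2, ← hn] at h1
      omega
    have hMc : ((2 : Int)) ^ n = ((M : Nat) : Int) := by rw [hMdef]; push_cast; ring
    set Q := (A' + 1) * M / B' ^ K with hQ
    have hQ1 : 1 ≤ Q := by
      rw [hQ]
      rw [Nat.le_div_iff_mul_le hBKpos]
      have : B' ^ K ≤ M := le_of_lt hMgt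
      nlinarith
    have hQM : Q ≤ M := by
      rw [hQ]
      calc (A' + 1) * M / B' ^ K ≤ B' ^ K * M / B' ^ K :=
            Nat.div_le_div_right (by nlinarith)
        _ = M := Nat.mul_div_cancel_left M hBKpos
    set Y := Q - 1 with hYdef
    have hYM : Y < M := by omega
    have hy : PySem.Int.floordiv (((A' : Int) + 1) * 2 ^ n) ((B' : Int) ^ K) - 1
        = ((Y : Nat) : Int) := by
      have h1 : ((A' : Int) + 1) * 2 ^ n = (((A' + 1) * M : Nat) : Int) := by
        rw [hMc]; push_cast; ring
      rw [h1, hpow, PySem.Int.floordiv_natCast, ← hQ]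
      omega
    set N0 := B' ^ K * Y / M with hN0def
    have hN0lt : N0 < B' ^ K := Nat.div_lt_of_lt_mul (by
      calc B' ^ K * Y < B' ^ K * M := Nat.mul_lt_mul_of_pos_left hYM hBKpos
        _ = M * B' ^ K := by ring)
    have hN : PySem.Int.floordiv ((B' : Int) ^ K * ((Y : Nat) : Int)) (2 ^ n)
        = ((N0 : Nat) : Int) := by
      have h1 : (B' : Int) ^ K * ((Y : Nat) : Int) = (((B' ^ K * Y : Nat)) : Int) := by
        push_cast; ring
      rw [h1, hMc, PySem.Int.floordiv_natCast, hN0def]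
    -- evaluate port A
    have hlenA : (PySem.List.pyRange 1 (k + 1) 1).length = K := by
      rw [PySem.List.length_pyRange_one]; omega
    have hA : div_free_naive (A' : Int) (B' : Int) k
        = String.ofList ((digA B' M K Y).map pvDigitChar) := by
      obtain ⟨y', _, hiter⟩ := iterA B' M hBpos hB16 hM K [] Y hYM
      simp only [div_free_naive]
      rw [← hK, ← hn, hy, hMc, foldl_const, hlenA, hiter]
      simp
    -- evaluate port B
    have hB : div_free_naive_alt (A' : Int) (B' : Int) k
        = String.ofList ((msd B' K N0).map pvDigitChar) := by
      simp only [div_free_naive_alt]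
      rw [← hK, ← hn, hy, hMc, ← hMc, hN, whileB_msd B' hBpos hB16 K N0 [] hN0lt]
      simp
    rw [hA, hB, digA_eq_msd B' M hBpos hM K Y hYM, ← hN0def]
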